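-- pv_equiv track=rewrite | github.com/Shih-yenh-suan/choose-suitable-vars | djangoGUI/app01/utils.py | unpack_Bracket
-- ===== SOURCE A (Python) =====
-- import itertools
--
-- def unpack_Bracket(input_str):
--     """单独处理包含中括号的情况
--     在前面一个函数后，对生成的子字符串列表进行处理
--     这些子字符串中仅可能包含中括号，且未被括号包裹的内容必须出现
--     因此，与前面的代码相比，删除了 normals 列表
--     optional_combinations 中也不需要增加 None，因为中括号中的元素不可以为空
--     """
--     optional = []
--     required = []
--     tokens = input_str.replace('[', ']').split(']')
--     for j in range(len(tokens)):
--         subpart = tokens[j].strip()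
--         if j % 2 == 1:  # 中括号内部，填入 optional
--             optional.append(subpart.split())
--         else:  # 中括号外部
--             if subpart:
--                 required.extend(subpart.split())
--     # 生成所有可能的子字符串
--     result = []
--
--     # 为选择性包含的元素生成所有组合
--     # 对于每个中括号组合，只选择一个或不选
--     optional_combinations = []
--     for group in optional:
--         optional_combinations.append(group)  # 添加None表示该组一个都不选
--     # 生成所有中括号组合的笛卡尔积
--     all_optional_combinations = list(itertools.product(*optional_combinations))
--
--     # 生成所有有效子字符串
--     for optionals in all_optional_combinations:
--         subset = list(required)  # 开始时包含所有必须包含的元素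
--         subset.extend(filter(None, optionals))  # 添加选择性元素，过滤掉None
--         result.append(" ".join(subset))
--
--     return result
-- ===== SOURCE B (Python) =====
-- def unpack_Bracket(input_str):
--     # One char-by-char scan (state machine) to collect required words and bracket
--     # groups, then mixed-radix index decoding to enumerate all combinations.
--     required, groups = [], []
--     cur_word, cur_group, inside = [], [], False
--     for ch in input_str:
--         if ch == '[' or ch == ']':
--             if cur_word:
--                 (cur_group if inside else required).append(''.join(cur_word))
--                 cur_word = []
--             if inside:
--                 groups.append(cur_group)
--                 cur_group = []
--             inside = not inside
--         elif ch.isspace():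
--             if cur_word:
--                 (cur_group if inside else required).append(''.join(cur_word))
--                 cur_word = []
--         else:
--             cur_word.append(ch)
--     if cur_word:
--         (cur_group if inside else required).append(''.join(cur_word))
--     if inside:
--         groups.append(cur_group)
--     total = 1
--     for g in groups:
--         total *= len(g)
--     result = []
--     for i in range(total):
--         parts = []
--         r = i
--         for g in reversed(groups):
--             r, d = divmod(r, len(g))
--             parts.append(g[d])
--         result.append(' '.join(required + parts[::-1]))
--     return result
-- ===== Notes on version B (the rewrite author's own statement) =====
-- stated objective: alternative
-- what changed: B replaces A's replace/split/strip token pipeline and itertools.product by a single character-level state machine that collects required words and bracket groups in one scan, and then enumerates the combinations by mixed-radix decoding of a running index i in range(prod of group sizes) instead of materialising a Cartesian product.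
import Mathlib
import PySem

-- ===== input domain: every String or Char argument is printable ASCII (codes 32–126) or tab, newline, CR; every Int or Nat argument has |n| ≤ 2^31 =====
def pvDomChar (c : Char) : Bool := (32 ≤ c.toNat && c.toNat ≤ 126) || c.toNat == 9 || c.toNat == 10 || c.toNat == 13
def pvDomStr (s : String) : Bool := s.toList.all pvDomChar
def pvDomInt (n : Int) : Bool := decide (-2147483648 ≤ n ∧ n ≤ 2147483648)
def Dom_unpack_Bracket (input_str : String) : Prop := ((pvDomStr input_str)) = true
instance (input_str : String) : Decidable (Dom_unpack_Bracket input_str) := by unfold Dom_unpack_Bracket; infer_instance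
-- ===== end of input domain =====

-- B replaces A's replace/split/strip + itertools.product pipeline by one character-level
-- state machine collecting required words and bracket groups, then enumerates combinations
-- by mixed-radix decoding of an index; objective: alternative (same cost, different algorithm).

-- ===== PORT A =====
-- itertools.product(*lists) over lists of strings, ported by hand (first factor varies slowest)
def pyProductStr : List (List String) → List (List String)
  | [] => [[]]
  | g :: gs => g.flatMap (fun x => (pyProductStr gs).map (fun t => x :: t))

-- the body of A's indexed for-loop over tokens (state: (optional, required))
def unpackA_step (st : List (List String) × List String) (jp : Int × String) :
    List (List String) × List String :=
  let subpart := PySem.Str.strip jp.2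
  if jp.1 % 2 == 1 then (st.1 ++ [PySem.Str.split₀ subpart], st.2)
  else if subpart ≠ "" then (st.1, st.2 ++ PySem.Str.split₀ subpart) else st

def unpack_Bracket (input_str : String) : List String :=
  let tokens := (PySem.Str.split? (PySem.Str.replace input_str "[" "]") "]").getD []
  let st := (PySem.List.enumerate tokens).foldl unpackA_step ([], [])
  let optional := st.1
  let required := st.2
  let optional_combinations := optional.foldl (fun acc g => acc ++ [g]) []
  let all_optional_combinations := pyProductStr optional_combinations
  all_optional_combinations.foldl
    (fun result optionals =>
      result ++ [PySem.Str.join " " (required ++ optionals.filter (fun w => w != ""))]) []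

-- ===== PORT B =====
-- state of Source B's character loop: (required, groups, cur_group, cur_word, inside);
-- ''.join over the collected character list cur_word is String.ofList (exact)
def unpackB_step (st : List String × List (List String) × List String × List Char × Bool)
    (ch : Char) : List String × List (List String) × List String × List Char × Bool :=
  match st with
  | (required, groups, cur_group, cur_word, inside) =>
    if ch = '[' ∨ ch = ']' then
      let rg : List String × List String :=
        if cur_word ≠ [] then
          (if inside then (required, cur_group ++ [String.ofList cur_word])
           else (required ++ [String.ofList cur_word], cur_group))
        else (required, cur_group)
      if inside then (rg.1, groups ++ [rg.2], [], [], false)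
      else (rg.1, groups, rg.2, [], true)
    else if PySem.Chars.isspace ch then
      if cur_word ≠ [] then
        (if inside then (required, groups, cur_group ++ [String.ofList cur_word], [], inside)
         else (required ++ [String.ofList cur_word], groups, cur_group, [], inside))
      else st
    else (required, groups, cur_group, cur_word ++ [ch], inside)

-- Source B's inner decoding loop body: r, d = divmod(r, len(g)); parts.append(g[d]).
-- divmod is ported as (floordiv, mod) and g[d] as pyGetD: this loop body only runs
-- when total > 0, hence len(g) > 0 and 0 ≤ d < len(g), so divmod cannot raise and
-- the pyGetD default is unreachable.
def unpackB_decode_step (rp : Int × List String) (g : List String) : Int × List String :=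
  (PySem.Int.floordiv rp.1 (PySem.List.len g),
   rp.2 ++ [PySem.List.pyGetD g (PySem.Int.mod rp.1 (PySem.List.len g)) ""])

def unpack_Bracket_alt (input_str : String) : List String :=
  match input_str.toList.foldl unpackB_step ([], [], [], [], false) with
  | (required0, groups0, cur_group0, cur_word0, inside) =>
    let required := if cur_word0 ≠ [] ∧ inside = false then required0 ++ [String.ofList cur_word0] else required0
    let cur_group := if cur_word0 ≠ [] ∧ inside = true then cur_group0 ++ [String.ofList cur_word0] else cur_group0
    let groups := if inside then groups0 ++ [cur_group] else groups0
    let total := groups.foldl (fun t g => t * PySem.List.len g) 1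
    (PySem.List.pyRange 0 total 1).foldl
      (fun result i =>
        let rp := groups.reverse.foldl unpackB_decode_step (i, [])
        result ++ [PySem.Str.join " "
          (required ++ (PySem.List.slice? rp.2 none none (-1)).getD [])]) []

-- ===== PRECONDITION & SPEC =====
def Spec_unpack_Bracket (input_str : String) (out : List String) : Prop := out = unpack_Bracket_alt input_str
instance (input_str : String) (out : List String) : Decidable (Spec_unpack_Bracket input_str out) := by unfold Spec_unpack_Bracket; infer_instance

-- ===== CLAIM (what is proved, stated in full; the proofs are below) =====
def Claim_equal_unpack_Bracket : Prop := ∀ (input_str : String), Dom_unpack_Bracket input_str → Spec_unpack_Bracket input_str (unpack_Bracket input_str)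

-- ===== LEMMAS AND PROOFS =====

-- ---- proof-side reference data ----

-- the character substitution performed by input_str.replace('[', ']')
def brSub (c : Char) : Char := if c = '[' then ']' else c

def isBr (c : Char) : Bool := c == '[' || c == ']'

-- reference: split a char list at every bracket character
def brSplit : List Char → List (List Char)
  | [] => [[]]
  | c :: cs => if isBr c then [] :: brSplit cs
               else match brSplit cs with
                    | [] => [[c]]
                    | t :: ts => (c :: t) :: ts

def consHead (w : List Char) : List (List Char) → List (List Char)
  | [] => [w]
  | t :: ts => (w ++ t) :: ts

def segWords (seg : List Char) : List String := (PySem.Chars.split₀ seg).map String.ofList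

-- reference parse of the segment list: (required words, bracket groups)
def psParse : List (List Char) → Bool → List String → List String × List (List String)
  | [], _, _ => ([], [])
  | [seg], inside, curg => if inside then ([], [curg ++ segWords seg]) else (segWords seg, [])
  | seg :: seg2 :: rest, inside, curg =>
      let pr := psParse (seg2 :: rest) (!inside) []
      if inside then (pr.1, (curg ++ segWords seg) :: pr.2)
      else (segWords seg ++ pr.1, pr.2)

-- B's end-of-loop flush, as a function of the final loop state
def finalizeB (st : List String × List (List String) × List String × List Char × Bool) :
    List String × List (List String) :=
  match st with
  | (req, grps, curg, cw, inside) =>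
    let req' := if cw ≠ [] ∧ inside = false then req ++ [String.ofList cw] else req
    let curg' := if cw ≠ [] ∧ inside = true then curg ++ [String.ofList cw] else curg
    (req', if inside then grps ++ [curg'] else grps)

def totalOf (gs : List (List String)) : Int := gs.foldl (fun t g => t * PySem.List.len g) 1

-- ---- replace / splitOn versus brSplit ----

lemma replace_go_eq (l : List Char) (fuel : Nat) (acc : List Char) (h : l.length ≤ fuel) :
    PySem.Chars.replace.go ['['] [']'] fuel l acc = acc.reverse ++ l.map brSub := by
  induction l generalizing fuel acc with
  | nil => cases fuel <;> simp [PySem.Chars.replace.go]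
  | cons c t ih =>
    cases fuel with
    | zero => simp at h
    | succ f =>
      rw [PySem.Chars.replace.go]
      by_cases hc : c = '['
      · have hp : (['['] : List Char).isPrefixOf (c :: t) = true := by simp [hc, List.isPrefixOf]
        rw [if_pos hp]
        have hd : List.drop (['['] : List Char).length (c :: t) = t := by simp
        rw [hd]
        simp only [List.length_cons] at h
        rw [ih f _ (by omega)]
        simp [hc, brSub]
      · have hp : (['['] : List Char).isPrefixOf (c :: t) = false := by
          simp [List.isPrefixOf]; exact fun h' => hc h'.symm
        rw [if_neg (by simp [hp])]
        simp only [List.length_cons] at h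
        rw [ih f _ (by omega)]
        simp [brSub, hc]

lemma replace_eq_map (s : List Char) : PySem.Chars.replace s ['['] [']'] = s.map brSub := by
  unfold PySem.Chars.replace
  rw [if_neg (by simp)]
  simpa using replace_go_eq s s.length []

lemma brSplit_ne_nil (cs : List Char) : brSplit cs ≠ [] := by
  cases cs with
  | nil => simp [brSplit]
  | cons c t =>
    simp only [brSplit]
    split_ifs
    · simp
    · rcases h : brSplit t with _ | ⟨x, xs⟩ <;> simp

lemma splitOn_go_eq (cs : List Char) (fuel : Nat) (cur : List Char) (acc : List (List Char))
    (h : cs.length < fuel) :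
    PySem.Chars.splitOn.go [']'] fuel (cs.map brSub) cur acc
      = acc.reverse ++ consHead cur.reverse (brSplit cs) := by
  induction cs generalizing fuel cur acc with
  | nil =>
    cases fuel with
    | zero => omega
    | succ f => simp [PySem.Chars.splitOn.go, brSplit, consHead]
  | cons c t ih =>
    cases fuel with
    | zero => omega
    | succ f =>
      simp only [List.map_cons]
      rw [PySem.Chars.splitOn.go]
      by_cases hc : isBr c = true
      · have hsub : brSub c = ']' := by
          rcases (by simpa [isBr] using hc : c = '[' ∨ c = ']') with rfl | rfl <;> simp [brSub]
        have hp : ([']'] : List Char).isPrefixOf (brSub c :: t.map brSub) = true := by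
          simp [hsub, List.isPrefixOf]
        rw [if_pos hp]
        simp only [List.length_cons] at h
        have := ih f [] (cur.reverse :: acc) (by omega)
        simp only [List.length_singleton, List.drop_succ_cons, List.drop_zero] at this ⊢
        rw [this]
        simp [brSplit, hc]
        rcases hbs : brSplit t with _ | ⟨x, xs⟩
        · exact absurd hbs (brSplit_ne_nil t)
        · simp [consHead]
      · have hne : c ≠ ']' ∧ c ≠ '[' := by
          constructor <;> intro h' <;> simp [isBr, h'] at hc
        have hsub : brSub c = c := by simp [brSub, hne.2]
        have hp : ([']'] : List Char).isPrefixOf (brSub c :: t.map brSub) = false := by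
          simp [hsub, List.isPrefixOf]; exact fun h' => hne.1 h'.symm
        rw [if_neg (by simp [hp])]
        simp only [List.length_cons] at h
        rw [hsub, ih f (c :: cur) acc (by omega)]
        simp only [brSplit, hc, if_false, Bool.false_eq_true]
        rcases hbs : brSplit t with _ | ⟨x, xs⟩
        · exact absurd hbs (brSplit_ne_nil t)
        · simp [consHead]

lemma tokens_eq (s : String) :
    (PySem.Str.split? (PySem.Str.replace s "[" "]") "]").getD []
      = (brSplit s.toList).map String.ofList := by
  have h1 : (PySem.Str.replace s "[" "]").toList = s.toList.map brSub := by
    rw [PySem.Str.toList_replace]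
    exact replace_eq_map s.toList
  unfold PySem.Str.split? PySem.Chars.split?
  rw [if_neg (by simp)]
  unfold PySem.Chars.splitOn
  rw [h1]
  have h2 := splitOn_go_eq s.toList ((List.map brSub s.toList).length + 1) [] []
    (by simp)
  have h3 : consHead [] (brSplit s.toList) = brSplit s.toList := by
    rcases hbs : brSplit s.toList with _ | ⟨x, xs⟩
    · exact absurd hbs (brSplit_ne_nil _)
    · simp [consHead]
  simp only [List.reverse_nil] at h2
  rw [h3] at h2
  have hsep : ("]" : String).toList = [']'] := rfl
  rw [hsep, h2]
  simp

-- ---- split₀ facts ----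

-- split₀ ignores surrounding whitespace
lemma go_all_space (ws : List Char) (cur : List Char) (acc : List (List Char))
    (h : ∀ c ∈ ws, PySem.Chars.isspace c = true) :
    PySem.Chars.split₀.go ws cur acc = PySem.Chars.split₀.go [] cur acc := by
  induction ws generalizing cur acc with
  | nil => rfl
  | cons c ws ih =>
    have hc : PySem.Chars.isspace c = true := h c (by simp)
    have h' : ∀ x ∈ ws, PySem.Chars.isspace x = true := fun x hx => h x (by simp [hx])
    conv_lhs => rw [PySem.Chars.split₀.go]
    rw [if_pos hc]
    by_cases hcur : cur.isEmpty
    · rw [if_pos hcur, ih _ _ h']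
      rw [PySem.Chars.split₀.go, PySem.Chars.split₀.go]
      simp [hcur]
    · rw [if_neg hcur, ih _ _ h']
      rw [PySem.Chars.split₀.go, PySem.Chars.split₀.go]
      simp [hcur]

lemma go_append_space (t ws : List Char) (cur : List Char) (acc : List (List Char))
    (h : ∀ c ∈ ws, PySem.Chars.isspace c = true) :
    PySem.Chars.split₀.go (t ++ ws) cur acc = PySem.Chars.split₀.go t cur acc := by
  induction t generalizing cur acc with
  | nil => simpa using go_all_space ws cur acc h
  | cons c t ih =>
    rw [List.cons_append, PySem.Chars.split₀.go]
    conv_rhs => rw [PySem.Chars.split₀.go]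
    split_ifs <;> exact ih _ _

lemma csplit₀_lstrip (cs : List Char) :
    PySem.Chars.split₀ (PySem.Chars.lstrip cs) = PySem.Chars.split₀ cs := by
  induction cs with
  | nil => rfl
  | cons c cs ih =>
    by_cases hc : PySem.Chars.isspace c = true
    · have h1 : PySem.Chars.lstrip (c :: cs) = PySem.Chars.lstrip cs := by
        simp [PySem.Chars.lstrip, hc]
      have h2 : PySem.Chars.split₀ (c :: cs) = PySem.Chars.split₀ cs := by
        unfold PySem.Chars.split₀
        rw [PySem.Chars.split₀.go]
        simp [hc]
      rw [h1, ih, h2]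
    · have h1 : PySem.Chars.lstrip (c :: cs) = c :: cs := by
        simp [PySem.Chars.lstrip, hc]
      rw [h1]

lemma csplit₀_rstrip (cs : List Char) :
    PySem.Chars.split₀ (PySem.Chars.rstrip cs) = PySem.Chars.split₀ cs := by
  have hsplit : cs = PySem.Chars.rstrip cs ++ (cs.reverse.takeWhile PySem.Chars.isspace).reverse := by
    unfold PySem.Chars.rstrip
    conv_lhs => rw [← List.reverse_reverse cs,
      ← List.takeWhile_append_dropWhile (p := PySem.Chars.isspace) (l := cs.reverse)]
    rw [List.reverse_append]
  have hws : ∀ c ∈ (cs.reverse.takeWhile PySem.Chars.isspace).reverse, PySem.Chars.isspace c = true := by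
    intro c hcmem
    exact List.mem_takeWhile_imp (by simpa using hcmem)
  conv_rhs => rw [hsplit]
  unfold PySem.Chars.split₀
  exact (go_append_space _ _ _ _ hws).symm

lemma csplit₀_strip (cs : List Char) :
    PySem.Chars.split₀ (PySem.Chars.strip cs) = PySem.Chars.split₀ cs := by
  unfold PySem.Chars.strip
  rw [csplit₀_rstrip, csplit₀_lstrip]

lemma split₀_strip (s : String) :
    PySem.Str.split₀ (PySem.Str.strip s) = PySem.Str.split₀ s := by
  unfold PySem.Str.split₀
  rw [PySem.Str.toList_strip, csplit₀_strip]

-- elements of split₀ are nonempty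
lemma go_ne_nil (s : List Char) (cur : List Char) (acc : List (List Char))
    (h : ∀ x ∈ acc, x ≠ []) : ∀ x ∈ PySem.Chars.split₀.go s cur acc, x ≠ [] := by
  induction s generalizing cur acc with
  | nil =>
    rw [PySem.Chars.split₀.go]
    split_ifs with hcur
    · simpa using h
    · intro x hx
      simp only [List.mem_reverse, List.mem_cons] at hx
      rcases hx with rfl | hx
      · simp only [ne_eq, List.reverse_eq_nil_iff]
        simpa [List.isEmpty_iff] using hcur
      · exact h x hx
  | cons c s ih =>
    rw [PySem.Chars.split₀.go]
    split_ifs with hc hcur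
    · exact ih _ _ h
    · refine ih _ _ ?_
      intro x hx
      rcases List.mem_cons.mp hx with rfl | hx
      · simp only [ne_eq, List.reverse_eq_nil_iff]
        simpa [List.isEmpty_iff] using hcur
      · exact h x hx
    · exact ih _ _ h

lemma segWords_ne (seg : List Char) : ∀ w ∈ segWords seg, w ≠ "" := by
  intro w hw hw0
  obtain ⟨cs, hcs, rfl⟩ := List.mem_map.mp hw
  have : cs ≠ [] := go_ne_nil _ _ _ (by simp) cs hcs
  apply this
  have := congrArg String.toList hw0
  simpa using this

-- split₀.go accumulator shift
lemma split₀_go_acc (s : List Char) (cur : List Char) (acc : List (List Char)) :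
    PySem.Chars.split₀.go s cur acc = acc.reverse ++ PySem.Chars.split₀.go s cur [] := by
  induction s generalizing cur acc with
  | nil =>
    rw [PySem.Chars.split₀.go]; conv_rhs => rw [PySem.Chars.split₀.go]
    split_ifs <;> simp
  | cons c s ih =>
    rw [PySem.Chars.split₀.go]; conv_rhs => rw [PySem.Chars.split₀.go]
    split_ifs with hc hcur
    · exact ih _ _
    · rw [ih [] (cur.reverse :: acc), ih [] [cur.reverse]]
      simp
    · exact ih _ _

-- pushing a space-free prefix into the current word
lemma split₀_go_push (w : List Char) (hw : ∀ c ∈ w, PySem.Chars.isspace c = false) :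
    ∀ (s cur : List Char) (acc : List (List Char)),
    PySem.Chars.split₀.go (w ++ s) cur acc = PySem.Chars.split₀.go s (w.reverse ++ cur) acc := by
  induction w with
  | nil => intro s cur acc; simp
  | cons c w ih =>
    intro s cur acc
    rw [List.cons_append, PySem.Chars.split₀.go, if_neg (by simp [hw c (by simp)])]
    rw [ih (fun x hx => hw x (by simp [hx])) s (c :: cur) acc]
    simp

lemma csplit₀_nonspace (w : List Char) (hw : ∀ c ∈ w, PySem.Chars.isspace c = false) :
    PySem.Chars.split₀ w = if w = [] then [] else [w] := by
  unfold PySem.Chars.split₀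
  have := split₀_go_push w hw [] [] []
  simp only [List.append_nil] at this
  rw [this, PySem.Chars.split₀.go]
  rcases eq_or_ne w [] with rfl | hne
  · simp
  · rw [if_neg (by simpa using hne), if_neg (by simpa [List.isEmpty_iff] using hne)]
    simp

lemma segWords_nonspace (w : List Char) (hw : ∀ c ∈ w, PySem.Chars.isspace c = false) :
    segWords w = if w = [] then [] else [String.ofList w] := by
  unfold segWords
  rw [csplit₀_nonspace w hw]
  split_ifs <;> simp

lemma csplit₀_space_cons (w : List Char) (c : Char) (rest : List Char)
    (hw : ∀ x ∈ w, PySem.Chars.isspace x = false) (hc : PySem.Chars.isspace c = true) :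
    PySem.Chars.split₀ (w ++ c :: rest)
      = (if w = [] then [] else [w]) ++ PySem.Chars.split₀ rest := by
  unfold PySem.Chars.split₀
  rw [split₀_go_push w hw (c :: rest) [] []]
  rw [PySem.Chars.split₀.go, if_pos hc]
  rcases eq_or_ne w [] with rfl | hne
  · simp
  · rw [if_neg (by simpa [List.isEmpty_iff] using hne)]
    rw [split₀_go_acc]
    simp [hne]

lemma segWords_space_cons (w : List Char) (c : Char) (rest : List Char)
    (hw : ∀ x ∈ w, PySem.Chars.isspace x = false) (hc : PySem.Chars.isspace c = true) :
    segWords (w ++ c :: rest)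
      = (if w = [] then [] else [String.ofList w]) ++ segWords rest := by
  unfold segWords
  rw [csplit₀_space_cons w c rest hw hc]
  split_ifs <;> simp

-- ---- brSplit facts ----

lemma brSplit_free_append (w : List Char) (cs : List Char) (hw : ∀ c ∈ w, isBr c = false) :
    brSplit (w ++ cs) = consHead w (brSplit cs) := by
  induction w with
  | nil =>
    rcases hbs : brSplit cs with _ | ⟨x, xs⟩
    · exact absurd hbs (brSplit_ne_nil _)
    · simp [consHead, hbs]
  | cons c w ih =>
    rw [List.cons_append]
    simp only [brSplit, hw c (by simp), if_false, Bool.false_eq_true]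
    rw [ih (fun x hx => hw x (by simp [hx]))]
    rcases hbs : brSplit cs with _ | ⟨x, xs⟩
    · exact absurd hbs (brSplit_ne_nil _)
    · simp [consHead]

-- ---- psParse facts ----

lemma psParse_first_true (s1 s2 : List Char) (t : List (List Char)) (curg ws0 : List String)
    (h : segWords s1 = ws0 ++ segWords s2) :
    psParse (s1 :: t) true curg = psParse (s2 :: t) true (curg ++ ws0) := by
  rcases t with _ | ⟨u, us⟩ <;> simp [psParse, h, List.append_assoc]

lemma psParse_first_false (s1 s2 : List Char) (t : List (List Char)) (curg : List String)
    (ws0 : List String) (h : segWords s1 = ws0 ++ segWords s2) :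
    psParse (s1 :: t) false curg
      = (ws0 ++ (psParse (s2 :: t) false curg).1, (psParse (s2 :: t) false curg).2) := by
  rcases t with _ | ⟨u, us⟩ <;> simp [psParse, h, List.append_assoc]

lemma psParse_groups_ne :
    ∀ (segs : List (List Char)) (inside : Bool) (curg : List String),
    (∀ w ∈ curg, w ≠ "") →
    ∀ g ∈ (psParse segs inside curg).2, ∀ w ∈ g, w ≠ ""
  | [], _, _, _ => by simp [psParse]
  | [seg], inside, curg, hcurg => by
    cases inside <;> simp only [psParse]
    · simp
    · intro g hg w hw
      simp only [if_true, List.mem_singleton] at hg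
      subst hg
      rcases List.mem_append.mp hw with h | h
      · exact hcurg w h
      · exact segWords_ne seg w h
  | seg :: seg2 :: rest, inside, curg, hcurg => by
    have ihrec := psParse_groups_ne (seg2 :: rest) (!inside) [] (by simp)
    cases inside <;> simp only [psParse, Bool.not_false, Bool.not_true]
    · simpa using ihrec
    · intro g hg w hw
      simp only [if_true, List.mem_cons] at hg
      rcases hg with rfl | hg
      · rcases List.mem_append.mp hw with h | h
        · exact hcurg w h
        · exact segWords_ne seg w h
      · exact ihrec g (by simpa using hg) w hw

-- ---- the A-side loop computes psParse ----

lemma parity_flip (j : Int) : (((j + 1) % 2 == 1) : Bool) = !(j % 2 == 1) := by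
  have h : (j + 1) % 2 = (j % 2 + 1) % 2 := by omega
  rcases Int.emod_two_eq j with h2 | h2 <;> simp [h, h2]

lemma stripWords (seg : List Char) :
    PySem.Str.split₀ (PySem.Str.strip (String.ofList seg)) = segWords seg := by
  rw [split₀_strip]
  unfold PySem.Str.split₀ segWords
  rw [String.toList_ofList]

lemma mainA :
    ∀ (segs : List (List Char)) (j : Int) (opt : List (List String)) (req : List String),
    (PySem.List.enumerate (segs.map String.ofList) j).foldl unpackA_step (opt, req)
      = (opt ++ (psParse segs (j % 2 == 1) []).2, req ++ (psParse segs (j % 2 == 1) []).1)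
  | [], j, opt, req => by simp [psParse]
  | [seg], j, opt, req => by
    simp only [List.map_cons, List.map_nil, PySem.List.enumerate_cons, PySem.List.enumerate_nil,
      List.foldl_cons, List.foldl_nil]
    unfold unpackA_step
    by_cases hj : ((j % 2 == 1) : Bool) = true
    · simp [hj, psParse, stripWords]
    · rw [Bool.not_eq_true] at hj
      by_cases he : PySem.Str.strip (String.ofList seg) = ""
      · have h0 : segWords seg = [] := by
          rw [← stripWords, he]; rfl
        simp [hj, he, psParse, h0]
      · simp [hj, he, psParse, stripWords]
  | seg :: seg2 :: rest, j, opt, req => by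
    rw [List.map_cons, PySem.List.enumerate_cons, List.foldl_cons]
    by_cases hj : ((j % 2 == 1) : Bool) = true
    · have hstep : unpackA_step (opt, req) (j, String.ofList seg)
          = (opt ++ [segWords seg], req) := by
        unfold unpackA_step
        simp [hj, stripWords]
      rw [hstep, mainA (seg2 :: rest) (j + 1) (opt ++ [segWords seg]) req, parity_flip, hj]
      simp only [Bool.not_true]
      simp [psParse]
    · rw [Bool.not_eq_true] at hj
      have hstep : unpackA_step (opt, req) (j, String.ofList seg)
          = (opt, req ++ segWords seg) := by
        unfold unpackA_step
        by_cases he : PySem.Str.strip (String.ofList seg) = ""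
        · have h0 : segWords seg = [] := by rw [← stripWords, he]; rfl
          simp [hj, he, h0]
        · simp [hj, he, stripWords]
      rw [hstep, mainA (seg2 :: rest) (j + 1) opt (req ++ segWords seg), parity_flip, hj]
      simp only [Bool.not_false]
      simp [psParse]

-- ---- the B-side character scan computes psParse ----

lemma segWords_nil : segWords [] = [] := rfl

lemma mainB :
    ∀ (cs cw : List Char) (req : List String) (grps : List (List String))
      (curg : List String) (inside : Bool),
    (∀ c ∈ cw, PySem.Chars.isspace c = false ∧ isBr c = false) →
    (inside = false → curg = []) →
    finalizeB (cs.foldl unpackB_step (req, grps, curg, cw, inside))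
      = (req ++ (psParse (brSplit (cw ++ cs)) inside curg).1,
         grps ++ (psParse (brSplit (cw ++ cs)) inside curg).2)
  | [], cw, req, grps, curg, inside, hcw, hcurg => by
    rw [List.foldl_nil, List.append_nil]
    have hbw : brSplit cw = [cw] := by
      have h := brSplit_free_append cw [] (fun c hc => (hcw c hc).2)
      simpa [brSplit, consHead] using h
    rw [hbw]
    cases inside
    · have hc0 : curg = [] := hcurg rfl
      subst hc0
      rcases eq_or_ne cw [] with rfl | hne
      · simp [finalizeB, psParse, segWords_nil]
      · simp [finalizeB, psParse, hne, segWords_nonspace cw (fun c hc => (hcw c hc).1)]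
    · rcases eq_or_ne cw [] with rfl | hne
      · simp [finalizeB, psParse, segWords_nil]
      · simp [finalizeB, psParse, hne, segWords_nonspace cw (fun c hc => (hcw c hc).1)]
  | c :: cs, cw, req, grps, curg, inside, hcw, hcurg => by
    rw [List.foldl_cons]
    have hsegs : brSplit cs ≠ [] := brSplit_ne_nil cs
    rcases hbs : brSplit cs with _ | ⟨t, ts⟩
    · exact absurd hbs hsegs
    have hcwfree : ∀ x ∈ cw, isBr x = false := fun x hx => (hcw x hx).2
    have hcwsp : ∀ x ∈ cw, PySem.Chars.isspace x = false := fun x hx => (hcw x hx).1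
    by_cases hbr : c = '[' ∨ c = ']'
    · -- bracket character: flush word, close group if inside, toggle
      have hbrt : isBr c = true := by rcases hbr with rfl | rfl <;> simp [isBr]
      have hsegc : brSplit (cw ++ c :: cs) = cw :: t :: ts := by
        rw [brSplit_free_append cw (c :: cs) hcwfree]
        simp [brSplit, hbrt, hbs, consHead]
      rw [hsegc]
      have hfw : segWords cw = if cw = [] then [] else [String.ofList cw] :=
        segWords_nonspace cw hcwsp
      cases inside
      · have hc0 : curg = [] := hcurg rfl
        subst hc0
        have hstep : unpackB_step (req, grps, [], cw, false) c
            = (req ++ segWords cw, grps, [], [], true) := by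
          unfold unpackB_step
          rcases eq_or_ne cw [] with rfl | hne
          · simp [hbr, hfw]
          · simp [hbr, hfw, hne]
        rw [hstep, mainB cs [] (req ++ segWords cw) grps [] true (by simp) (by simp)]
        rw [List.nil_append]
        simp [psParse, hbs, List.append_assoc]
      · have hstep : unpackB_step (req, grps, curg, cw, true) c
            = (req, grps ++ [curg ++ segWords cw], [], [], false) := by
          unfold unpackB_step
          rcases eq_or_ne cw [] with rfl | hne
          · simp [hbr, hfw]
          · simp [hbr, hfw, hne]
        rw [hstep, mainB cs [] req (grps ++ [curg ++ segWords cw]) [] false (by simp) (by simp)]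
        rw [List.nil_append]
        simp [psParse, hbs, List.append_assoc]
    · have hbrf : isBr c = false := by
        simp only [isBr, Bool.or_eq_false_iff, beq_eq_false_iff_ne]
        exact ⟨fun h => hbr (Or.inl h), fun h => hbr (Or.inr h)⟩
      have hsegc : brSplit (cw ++ c :: cs) = (cw ++ c :: t) :: ts := by
        rw [brSplit_free_append cw (c :: cs) hcwfree]
        simp [brSplit, hbrf, hbs, consHead]
      rw [hsegc]
      by_cases hsp : PySem.Chars.isspace c = true
      · -- whitespace: flush the current word
        have hwords : segWords (cw ++ c :: t)
            = (if cw = [] then [] else [String.ofList cw]) ++ segWords t :=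
          segWords_space_cons cw c t hcwsp hsp
        rcases eq_or_ne cw [] with rfl | hne
        · have hstep : unpackB_step (req, grps, curg, [], inside) c
              = (req, grps, curg, [], inside) := by
            unfold unpackB_step
            simp [hbr, hsp]
          rw [hstep, mainB cs [] req grps curg inside (by simp) hcurg]
          rw [List.nil_append, hbs]
          have hw0 : segWords ([] ++ c :: t) = [] ++ segWords t := by simpa using hwords
          cases inside
          · rw [psParse_first_false ([] ++ c :: t) t ts curg [] hw0]
            simp
          · rw [psParse_first_true ([] ++ c :: t) t ts curg [] hw0]
            simp
        · cases inside
          · have hc0 : curg = [] := hcurg rfl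
            subst hc0
            have hstep : unpackB_step (req, grps, [], cw, false) c
                = (req ++ [String.ofList cw], grps, [], [], false) := by
              unfold unpackB_step
              simp [hbr, hsp, hne]
            rw [hstep, mainB cs [] (req ++ [String.ofList cw]) grps [] false (by simp) (by simp)]
            rw [List.nil_append, hbs]
            rw [psParse_first_false (cw ++ c :: t) t ts [] [String.ofList cw] (by simpa [hne] using hwords)]
            simp [List.append_assoc]
          · have hstep : unpackB_step (req, grps, curg, cw, true) c
                = (req, grps, curg ++ [String.ofList cw], [], true) := by
              unfold unpackB_step
              simp [hbr, hsp, hne]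
            rw [hstep, mainB cs [] req grps (curg ++ [String.ofList cw]) true (by simp) (by simp)]
            rw [List.nil_append, hbs]
            rw [psParse_first_true (cw ++ c :: t) t ts curg [String.ofList cw] (by simpa [hne] using hwords)]
      · -- ordinary character: extend the current word
        have hstep : unpackB_step (req, grps, curg, cw, inside) c
            = (req, grps, curg, cw ++ [c], inside) := by
          unfold unpackB_step
          simp [hbr, hsp]
        have hcw' : ∀ x ∈ cw ++ [c], PySem.Chars.isspace x = false ∧ isBr x = false := by
          intro x hx
          rcases List.mem_append.mp hx with hx | hx
          · exact hcw x hx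
          · rcases List.mem_singleton.mp hx with rfl
            exact ⟨by simpa using hsp, hbrf⟩
        rw [hstep, mainB cs (cw ++ [c]) req grps curg inside hcw' hcurg]
        rw [← List.append_cons, hsegc]

-- ---- product and mixed-radix enumeration ----

lemma product_ne_empty (gs : List (List String)) (h : ∀ g ∈ gs, ∀ w ∈ g, w ≠ "")
    (t : List String) (ht : t ∈ pyProductStr gs) : ∀ w ∈ t, w ≠ "" := by
  induction gs generalizing t with
  | nil =>
    simp only [pyProductStr, List.mem_singleton] at ht
    subst ht; simp
  | cons g gs ih =>
    simp only [pyProductStr, List.mem_flatMap, List.mem_map] at ht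
    obtain ⟨x, hx, t', ht', rfl⟩ := ht
    intro w hw
    rcases List.mem_cons.mp hw with rfl | hw
    · exact h g (by simp) w hx
    · exact ih (fun g' hg' => h g' (by simp [hg'])) t' ht' w hw

lemma product_append_singleton (gs : List (List String)) (g : List String) :
    pyProductStr (gs ++ [g]) = (pyProductStr gs).flatMap (fun t => g.map (fun x => t ++ [x])) := by
  induction gs with
  | nil => induction g <;> simp_all [pyProductStr]
  | cons h hs ih =>
    simp only [List.cons_append, pyProductStr, ih]
    simp only [List.flatMap_assoc, List.flatMap_map, List.map_flatMap, List.map_map,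
      Function.comp_def, List.cons_append]

lemma decode_acc (hs : List (List String)) (r : Int) (acc : List String) :
    hs.foldl unpackB_decode_step (r, acc)
      = ((hs.foldl unpackB_decode_step (r, [])).1, acc ++ (hs.foldl unpackB_decode_step (r, [])).2) := by
  induction hs generalizing r acc with
  | nil => simp
  | cons g hs ih =>
    rw [List.foldl_cons, List.foldl_cons]
    rw [show unpackB_decode_step (r, acc) g
        = (PySem.Int.floordiv r (PySem.List.len g),
           acc ++ [PySem.List.pyGetD g (PySem.Int.mod r (PySem.List.len g)) ""]) from rfl]
    rw [show unpackB_decode_step (r, []) g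
        = (PySem.Int.floordiv r (PySem.List.len g),
           [] ++ [PySem.List.pyGetD g (PySem.Int.mod r (PySem.List.len g)) ""]) from rfl]
    rw [ih (PySem.Int.floordiv r (PySem.List.len g))
        (acc ++ [PySem.List.pyGetD g (PySem.Int.mod r (PySem.List.len g)) ""]),
        ih (PySem.Int.floordiv r (PySem.List.len g))
        ([] ++ [PySem.List.pyGetD g (PySem.Int.mod r (PySem.List.len g)) ""])]
    simp

lemma totalOf_nonneg (gs : List (List String)) : 0 ≤ totalOf gs := by
  have h : ∀ (t : Int), 0 ≤ t → 0 ≤ gs.foldl (fun t g => t * PySem.List.len g) t := by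
    induction gs with
    | nil => intro t ht; simpa using ht
    | cons g gs ih =>
      intro t ht
      simp only [List.foldl_cons]
      exact ih _ (mul_nonneg ht (by simp [PySem.List.len_eq]))
  exact h 1 (by norm_num)

lemma totalOf_append (gs : List (List String)) (g : List String) :
    totalOf (gs ++ [g]) = totalOf gs * PySem.List.len g := by
  unfold totalOf
  rw [List.foldl_append]
  simp

lemma block_map (L : Int) (hL : 0 < L) {α : Type} (f : Int → Int → α) (n : Nat) :
    (PySem.List.pyRange 0 ((n : Int) * L) 1).map
        (fun i => f (PySem.Int.floordiv i L) (PySem.Int.mod i L))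
      = (List.range n).flatMap (fun (j : Nat) => (PySem.List.pyRange 0 L 1).map (fun k => f (j : Int) k)) := by
  induction n with
  | zero =>
    rw [show ((0 : Nat) : Int) * L = 0 by simp, PySem.List.pyRange_one_eq_nil le_rfl]
    simp
  | succ n ih =>
    have hcast : ((n + 1 : Nat) : Int) = (n : Int) + 1 := by push_cast; ring
    have hsplit := PySem.List.pyRange_one_append 0 ((n : Int) * L) (((n : Int) + 1) * L)
      (by positivity) (by nlinarith)
    rw [hcast, hsplit, List.map_append, ih, List.range_succ, List.flatMap_append]
    congr 1
    simp only [List.flatMap_cons, List.flatMap_nil, List.append_nil]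
    rw [PySem.List.pyRange_one ((n : Int) * L) (((n : Int) + 1) * L),
        PySem.List.pyRange_one 0 L]
    simp only [List.map_map, Function.comp_def]
    have harg : (((n : Int) + 1) * L - (n : Int) * L).toNat = (L - 0).toNat := by
      congr 1; ring
    rw [harg]
    refine List.map_congr_left ?_
    intro k hk
    simp only [List.mem_range] at hk
    have hkL : (k : Int) < L := by
      have h1 : k < (L - 0).toNat := hk
      omega
    have hfd : PySem.Int.floordiv ((n : Int) * L + k) L = (n : Int) := by
      rw [PySem.Int.floordiv_eq_ediv_of_pos hL]
      rw [show ((n : Int) * L + k) = (k : Int) + L * (n : Int) by ring]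
      rw [Int.add_mul_ediv_left _ _ (by omega)]
      rw [Int.ediv_eq_zero_of_lt (by positivity) hkL]
      simp
    have hmd : PySem.Int.mod ((n : Int) * L + k) L = (k : Int) := by
      rw [PySem.Int.mod_eq_emod_of_pos hL]
      rw [show ((n : Int) * L + k) = (k : Int) + L * (n : Int) by ring]
      rw [Int.add_mul_emod_self_left]
      exact Int.emod_eq_of_lt (by positivity) hkL
    rw [hfd, hmd]
    simp

lemma map_getD_block (g : List String) (pre : List String) :
    (PySem.List.pyRange 0 (PySem.List.len g) 1).map
        (fun k => pre ++ [PySem.List.pyGetD g k ""])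
      = g.map (fun x => pre ++ [x]) := by
  conv_rhs => rw [← PySem.List.map_pyGetD_pyRange_zero g ""]
  rw [List.map_map]
  rfl

lemma mixed_radix (gs : List (List String)) :
    (PySem.List.pyRange 0 (totalOf gs) 1).map
        (fun i => ((gs.reverse.foldl unpackB_decode_step (i, [])).2).reverse)
      = pyProductStr gs := by
  induction gs using List.reverseRecOn with
  | nil =>
    have h1 : PySem.List.pyRange 0 (totalOf []) 1 = [0] := by
      rw [show totalOf [] = (0 : Int) + 1 by decide]
      exact PySem.List.pyRange_one_singleton 0
    rw [h1]
    simp [pyProductStr]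
  | append_singleton gs g ih =>
    rw [totalOf_append, product_append_singleton]
    rcases eq_or_ne g [] with rfl | hg
    · rw [show PySem.List.len ([] : List String) = 0 from rfl, mul_zero,
          PySem.List.pyRange_one_eq_nil le_rfl]
      simp
    · have hL : 0 < PySem.List.len g := by
        simp only [PySem.List.len_eq]
        exact_mod_cast List.length_pos_iff.mpr hg
      have hT0 : 0 ≤ totalOf gs := totalOf_nonneg gs
      obtain ⟨n, hn⟩ : ∃ n : Nat, totalOf gs = (n : Int) :=
        ⟨(totalOf gs).toNat, (Int.toNat_of_nonneg hT0).symm⟩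
      have hdec : ∀ i : Int,
          (((gs ++ [g]).reverse.foldl unpackB_decode_step (i, [])).2).reverse
            = ((gs.reverse.foldl unpackB_decode_step
                  (PySem.Int.floordiv i (PySem.List.len g), [])).2).reverse
              ++ [PySem.List.pyGetD g (PySem.Int.mod i (PySem.List.len g)) ""] := by
        intro i
        rw [List.reverse_append, List.reverse_singleton, List.singleton_append, List.foldl_cons]
        rw [show unpackB_decode_step (i, []) g
            = (PySem.Int.floordiv i (PySem.List.len g),
               [] ++ [PySem.List.pyGetD g (PySem.Int.mod i (PySem.List.len g)) ""]) from rfl]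
        rw [decode_acc]
        simp
    -- continue
      rw [hn]
      have h1 : (PySem.List.pyRange 0 ((n : Int) * PySem.List.len g) 1).map
          (fun i => (((gs ++ [g]).reverse.foldl unpackB_decode_step (i, [])).2).reverse)
        = (PySem.List.pyRange 0 ((n : Int) * PySem.List.len g) 1).map
          (fun i => ((gs.reverse.foldl unpackB_decode_step
                (PySem.Int.floordiv i (PySem.List.len g), [])).2).reverse
            ++ [PySem.List.pyGetD g (PySem.Int.mod i (PySem.List.len g)) ""]) :=
        List.map_congr_left (fun i _ => hdec i)
      rw [h1, block_map (PySem.List.len g) hL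
        (fun j k => ((gs.reverse.foldl unpackB_decode_step (j, [])).2).reverse
          ++ [PySem.List.pyGetD g k ""]) n]
      rw [hn] at ih
      rw [← ih]
      rw [PySem.List.pyRange_one 0 (n : Int)]
      simp only [sub_zero, Int.toNat_natCast, List.map_map, List.flatMap_map, Function.comp_def,
        zero_add]
      congr 1
      funext j
      exact map_getD_block g _

-- ===== VERDICT (by name: the statement is the Claim_ definition above) =====
theorem unpack_Bracket_spec : Claim_equal_unpack_Bracket := by
  intro s _
  unfold Spec_unpack_Bracket unpack_Bracket unpack_Bracket_alt
  dsimp only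
  rw [tokens_eq s, mainA (brSplit s.toList) 0 [] []]
  simp only [show (((0 : Int) % 2 == 1) : Bool) = false by decide]
  have hfin := mainB s.toList [] [] [] [] false (by simp) (fun _ => rfl)
  simp only [List.nil_append] at hfin
  rcases hst : s.toList.foldl unpackB_step ([], [], [], [], false) with ⟨r0, g0, c0, w0, ins⟩
  rw [hst] at hfin
  simp only [finalizeB] at hfin
  dsimp only
  have h1 := congrArg Prod.fst hfin
  have h2 := congrArg Prod.snd hfin
  simp only at h1 h2
  simp only [List.nil_append]
  rw [h1, h2]
  rw [PySem.List.foldl_append_singleton_eq_map (fun (g : List String) => g)]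
  simp only [List.nil_append, List.map_id']
  rw [PySem.List.foldl_append_singleton_eq_map, PySem.List.foldl_append_singleton_eq_map]
  simp only [List.nil_append, PySem.List.slice?_none_none_neg_one, Option.getD_some]
  have htot : List.foldl (fun t g => t * PySem.List.len g) 1
      (psParse (brSplit s.toList) false []).2
      = totalOf (psParse (brSplit s.toList) false []).2 := rfl
  rw [htot]
  have hcomp : (fun i => PySem.Str.join " " ((psParse (brSplit s.toList) false []).1 ++
        (((psParse (brSplit s.toList) false []).2.reverse.foldl unpackB_decode_step (i, [])).2).reverse))
      = (fun t => PySem.Str.join " " ((psParse (brSplit s.toList) false []).1 ++ t)) ∘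
        (fun i => (((psParse (brSplit s.toList) false []).2.reverse.foldl
            unpackB_decode_step (i, [])).2).reverse) := rfl
  rw [hcomp, ← List.map_map, mixed_radix]
  refine List.map_congr_left ?_
  intro t ht
  have hne : ∀ w ∈ t, w ≠ "" :=
    product_ne_empty _ (psParse_groups_ne (brSplit s.toList) false [] (by simp)) t ht
  have hfil : t.filter (fun w => w != "") = t := by
    refine List.filter_eq_self.mpr ?_
    intro w hw
    simpa using hne w hw
  rw [hfil]
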